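-- pv_equiv track=rewrite | github.com/sjandro/Python_Projects | pattern_matcher.py | get_correct_paterns
-- ===== SOURCE A (Python) =====
-- WILDCARD = '*'
--
-- def get_correct_paterns(pattern_list):
--     """
--     Returns patterns, with the least number of wildcards.
--     """
--     least_list = []
--     least = None
--
--     for pattern in pattern_list:
--         wild_count = pattern.count(WILDCARD)
--
--         if least == None: #if fisrt iteration, assign least
--             least = wild_count
--
--         if wild_count < least:
--             least = wild_count
--             least_list[:] = []
--             least_list.append(pattern)
--         elif wild_count == least: least_list.append(pattern)
--
--     if len(least_list) > 1: return reduce(least_list)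
--     else: return least_list
--
-- def reduce(pattern_fields):
--     """
--     Return the pattern whose wildcards are furthest to the right.
--     """
--     reduced_pattern = None
--     highest = None
--
--     for pattern in pattern_fields:
--         wild_count = sum([i for i, j in enumerate(pattern) if j == WILDCARD])
--
--         if highest is None: #if first iteration, assign highest
--             highest = wild_count
--             reduced_pattern = pattern
--         elif wild_count > highest:
--             highest = wild_count
--             reduced_pattern = pattern
--     return [reduced_pattern]
-- ===== SOURCE B (Python) =====
-- WILDCARD = '*'
--
-- def get_correct_paterns(pattern_list):
--     """
--     Returns patterns, with the least number of wildcards.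
--     """
--     best = None
--     best_key = None
--     for pattern in pattern_list:
--         key = (pattern.count(WILDCARD),
--                -sum(i for i, c in enumerate(pattern) if c == WILDCARD))
--         if best is None or key < best_key:
--             best, best_key = pattern, key
--     return [] if best is None else [best]
-- ===== Notes on version B (the rewrite author's own statement) =====
-- stated objective: simpler
-- what changed: Replaced A's two sequential passes (collect all minimum-wildcard patterns into least_list, then a separate reduce() pass picking the rightmost-wildcard one) with a single fold keeping the current best pattern under the composite key (wildcard count, -sum of wildcard positions), strict '<' preserving first-wins ties.
import Mathlib
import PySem

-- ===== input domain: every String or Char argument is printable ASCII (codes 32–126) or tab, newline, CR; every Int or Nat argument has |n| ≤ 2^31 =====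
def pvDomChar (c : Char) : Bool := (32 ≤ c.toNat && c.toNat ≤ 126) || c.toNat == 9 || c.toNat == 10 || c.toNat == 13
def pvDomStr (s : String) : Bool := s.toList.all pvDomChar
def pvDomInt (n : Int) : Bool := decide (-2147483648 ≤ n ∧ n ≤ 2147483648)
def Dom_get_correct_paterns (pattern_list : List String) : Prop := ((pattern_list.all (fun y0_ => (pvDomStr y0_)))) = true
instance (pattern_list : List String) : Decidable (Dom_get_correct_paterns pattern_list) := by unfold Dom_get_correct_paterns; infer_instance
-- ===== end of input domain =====

-- B replaces A's two passes (collect all minimum-wildcard patterns, then reduce()) by one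
-- accumulator pass over a composite key; objective: simpler.

-- ===== PORT A =====

-- pattern.count(WILDCARD)
def pvWildCount (pattern : String) : Int := (PySem.Str.count pattern "*" : Int)

-- sum([i for i, j in enumerate(pattern) if j == WILDCARD])
def pvWildPosSum (pattern : String) : Int :=
  (((PySem.List.enumerate pattern.toList).filter (fun ij => ij.2 = '*')).map (fun ij => ij.1)).sum

-- the loop of reduce(): state (reduced_pattern, highest)
def pvReduceLoop : List String → Option String × Option Int → Option String × Option Int
  | [], st => st
  | pattern :: rest, (reduced_pattern, highest) =>
    let wild_count := pvWildPosSum pattern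
    match highest with
    | none => pvReduceLoop rest (some pattern, some wild_count)
    | some h =>
      if wild_count > h then pvReduceLoop rest (some pattern, some wild_count)
      else pvReduceLoop rest (reduced_pattern, some h)

-- reduce(pattern_fields); A only calls it with ≥ 2 elements, where reduced_pattern is some _
def pvReduce (pattern_fields : List String) : List String :=
  match (pvReduceLoop pattern_fields (none, none)).1 with
  | some p => [p]
  | none => []

-- the main loop of A: state (least_list, least)
def pvALoop : List String → List String × Option Int → List String × Option Int
  | [], st => st
  | pattern :: rest, (least_list, least) =>
    let wild_count := pvWildCount pattern
    let l := match least with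
             | none => wild_count
             | some c => c
    if wild_count < l then pvALoop rest ([pattern], some wild_count)
    else if wild_count = l then pvALoop rest (least_list ++ [pattern], some l)
    else pvALoop rest (least_list, some l)

def get_correct_paterns (pattern_list : List String) : List String :=
  let st := pvALoop pattern_list ([], none)
  if st.1.length > 1 then pvReduce st.1 else st.1

-- ===== PORT B =====

-- single pass: best = some (pattern, key1, key2) with key = (count, -position_sum)
def pvBLoop : List String → Option (String × Int × Int) → Option (String × Int × Int)
  | [], best => best
  | pattern :: rest, best =>
    let k1 := pvWildCount pattern
    let k2 := -pvWildPosSum pattern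
    match best with
    | none => pvBLoop rest (some (pattern, k1, k2))
    | some (bp, b1, b2) =>
      if k1 < b1 ∨ (k1 = b1 ∧ k2 < b2) then pvBLoop rest (some (pattern, k1, k2))
      else pvBLoop rest (some (bp, b1, b2))

def get_correct_paterns_alt (pattern_list : List String) : List String :=
  match pvBLoop pattern_list none with
  | none => []
  | some (p, _, _) => [p]

-- ===== PRECONDITION & SPEC =====
def Spec_get_correct_paterns (pattern_list : List String) (out : List String) : Prop := out = get_correct_paterns_alt pattern_list
instance (pattern_list : List String) (out : List String) : Decidable (Spec_get_correct_paterns pattern_list out) := by unfold Spec_get_correct_paterns; infer_instance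

-- ===== CLAIM (what is proved, stated in full; the proofs are below) =====
def Claim_equal_get_correct_paterns : Prop := ∀ (pattern_list : List String), Dom_get_correct_paterns pattern_list → Spec_get_correct_paterns pattern_list (get_correct_paterns pattern_list)

-- ===== LEMMAS AND PROOFS =====

-- pvReduceLoop is a fold, so it splits over append
theorem pvReduceLoop_append (L M : List String) (st : Option String × Option Int) :
    pvReduceLoop (L ++ M) st = pvReduceLoop M (pvReduceLoop L st) := by
  induction L generalizing st with
  | nil => rfl
  | cons p rest ih =>
    obtain ⟨rp, h⟩ := st
    cases h with
    | none => simp only [List.cons_append, pvReduceLoop]; exact ih _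
    | some hv =>
      simp only [List.cons_append, pvReduceLoop]
      split_ifs <;> exact ih _

-- under the invariant, A's final dispatch always equals [the reduce() winner]
theorem pvFinish (L : List String) (r : String) (h : Option Int)
    (hred : pvReduceLoop L (none, none) = (some r, h)) :
    (if L.length > 1 then pvReduce L else L) = [r] := by
  match L with
  | [] => simp [pvReduceLoop] at hred
  | [q] =>
    simp only [pvReduceLoop, Prod.mk.injEq, Option.some.injEq] at hred
    simp [hred.1]
  | q₁ :: q₂ :: rest =>
    simp only [List.length_cons, pvReduce, hred]
    split_ifs with hlen
    · rfl
    · omega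

-- main invariant: if A's state is (L, some c) with the reduce() winner on L being r (of count c),
-- and B's state is that winner with its key, the two loops stay in step.
theorem pvMain (l : List String) : ∀ (L : List String) (c : Int) (r : String),
    pvWildCount r = c →
    pvReduceLoop L (none, none) = (some r, some (pvWildPosSum r)) →
    ∃ r',
      pvReduceLoop (pvALoop l (L, some c)).1 (none, none) = (some r', some (pvWildPosSum r')) ∧
      (if (pvALoop l (L, some c)).1.length > 1 then pvReduce (pvALoop l (L, some c)).1
        else (pvALoop l (L, some c)).1) = [r'] ∧
      pvBLoop l (some (r, c, -pvWildPosSum r)) = some (r', pvWildCount r', -pvWildPosSum r') := by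
  induction l with
  | nil =>
    intro L c r hc hred
    exact ⟨r, hred, pvFinish L r _ hred, by simp [pvBLoop, hc]⟩
  | cons p rest ih =>
    intro L c r hc hred
    simp only [pvALoop, pvBLoop]
    by_cases h1 : pvWildCount p < c
    · -- new strict minimum: both sides reset to p
      have hB : pvWildCount p < c ∨ (pvWildCount p = c ∧ -pvWildPosSum p < -pvWildPosSum r) :=
        Or.inl h1
      rw [if_pos h1, if_pos hB]
      exact ih [p] (pvWildCount p) p rfl (by simp [pvReduceLoop])
    · rw [if_neg h1]
      by_cases h2 : pvWildCount p = c
      · -- tie on the count: decided by position sums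
        rw [if_pos h2]
        by_cases h3 : pvWildPosSum p > pvWildPosSum r
        · have hB : pvWildCount p < c ∨ (pvWildCount p = c ∧ -pvWildPosSum p < -pvWildPosSum r) :=
            Or.inr ⟨h2, by omega⟩
          rw [if_pos hB]
          have : pvReduceLoop (L ++ [p]) (none, none) = (some p, some (pvWildPosSum p)) := by
            rw [pvReduceLoop_append, hred]
            simp [pvReduceLoop, h3]
          rw [h2]
          exact ih (L ++ [p]) c p h2 this
        · have hB : ¬ (pvWildCount p < c ∨ (pvWildCount p = c ∧ -pvWildPosSum p < -pvWildPosSum r)) := by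
            rintro (h | ⟨-, h⟩) <;> omega
          rw [if_neg hB]
          have : pvReduceLoop (L ++ [p]) (none, none) = (some r, some (pvWildPosSum r)) := by
            rw [pvReduceLoop_append, hred]
            simp [pvReduceLoop, h3]
          exact ih (L ++ [p]) c r hc this
      · -- strictly more wildcards: both sides ignore p
        have hB : ¬ (pvWildCount p < c ∨ (pvWildCount p = c ∧ -pvWildPosSum p < -pvWildPosSum r)) := by
          rintro (h | ⟨h, -⟩) <;> omega
        rw [if_neg h2, if_neg hB]
        exact ih L c r hc hred

-- ===== VERDICT (by name: the statement is the Claim_ definition above) =====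
theorem get_correct_paterns_spec : Claim_equal_get_correct_paterns := by
  intro pattern_list _
  unfold Spec_get_correct_paterns get_correct_paterns get_correct_paterns_alt
  match pattern_list with
  | [] => rfl
  | p :: rest =>
    have hA : pvALoop (p :: rest) ([], none) = pvALoop rest ([p], some (pvWildCount p)) := by
      simp [pvALoop]
    have hBstep : pvBLoop (p :: rest) none
        = pvBLoop rest (some (p, pvWildCount p, -pvWildPosSum p)) := rfl
    obtain ⟨r', hred, hfin, hb⟩ :=
      pvMain rest [p] (pvWildCount p) p rfl (by simp [pvReduceLoop])
    rw [hA, hBstep, hb, hfin]
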